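-- pv_equiv track=rewrite | github.com/analysiscenter/batchflow | batchflow/models/torch/layers/utils.py | _compute_same_padding_transposed
-- ===== SOURCE A (Python) =====
-- def _compute_same_padding_transposed(kernel_size, dilation, stride):
--     # Pre-compute some variables
--     effective_kernel_size = dilation * (kernel_size - 1) + 1
--     kernel_residual = effective_kernel_size - stride
--
--     for output_padding in range(stride)[::-1]:
--         two_padding = kernel_residual + output_padding
--         if two_padding % 2 == 0:
--             return two_padding // 2, output_padding
--     raise ValueError('Never raised')
-- ===== SOURCE B (Python) =====
-- def _compute_same_padding_transposed(kernel_size, dilation, stride):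
--     # Closed form: the loop in A just picks the largest output_padding in
--     # range(stride) whose parity makes kernel_residual + output_padding even.
--     effective_kernel_size = dilation * (kernel_size - 1) + 1
--     kernel_residual = effective_kernel_size - stride
--     output_padding = stride - 1 if (kernel_residual + stride - 1) % 2 == 0 else stride - 2
--     if output_padding < 0:
--         raise ValueError('Never raised')
--     return (kernel_residual + output_padding) // 2, output_padding
-- ===== Notes on version B (the rewrite author's own statement) =====
-- stated objective: simpler
-- what changed: Replaced A's reversed range scan with a closed-form parity computation picking output_padding directly (stride-1 or stride-2).
import Mathlib
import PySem

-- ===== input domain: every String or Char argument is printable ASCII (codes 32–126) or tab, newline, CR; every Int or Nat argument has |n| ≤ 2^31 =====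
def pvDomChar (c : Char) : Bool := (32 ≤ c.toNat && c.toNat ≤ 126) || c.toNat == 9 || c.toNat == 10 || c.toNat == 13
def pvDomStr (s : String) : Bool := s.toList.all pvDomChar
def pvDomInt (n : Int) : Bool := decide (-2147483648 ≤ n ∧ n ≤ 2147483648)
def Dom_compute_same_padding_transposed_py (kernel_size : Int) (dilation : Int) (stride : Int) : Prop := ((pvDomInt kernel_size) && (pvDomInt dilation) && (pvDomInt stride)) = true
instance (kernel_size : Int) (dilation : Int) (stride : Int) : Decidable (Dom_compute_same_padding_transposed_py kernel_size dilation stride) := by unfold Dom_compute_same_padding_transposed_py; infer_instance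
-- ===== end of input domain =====

-- B replaces A's reversed-range scan with a closed-form parity choice of output_padding (simpler, O(1)).

-- ===== PORT A =====
-- the for-loop over range(stride)[::-1], i.e. output_padding = stride-1, stride-2, ..., 0;
-- iterated lazily (like Python's reversed range) with the number of remaining iterations as fuel;
-- none = the loop fell through (Python then raises ValueError)
def pvLoopA (kernel_residual : Int) : Nat → Int → Option (Int × Int)
  | 0, _ => none
  | n + 1, op =>
    let two_padding := kernel_residual + op
    if PySem.Int.mod two_padding 2 == 0 then some (PySem.Int.floordiv two_padding 2, op)
    else pvLoopA kernel_residual n (op - 1)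

def compute_same_padding_transposed_py (kernel_size : Int) (dilation : Int) (stride : Int) : Int × Int :=
  let effective_kernel_size := dilation * (kernel_size - 1) + 1
  let kernel_residual := effective_kernel_size - stride
  match pvLoopA kernel_residual stride.toNat (stride - 1) with
  | some r => r
  | none => (0, 0)   -- Python raises ValueError here; excluded by Pre_

-- ===== PORT B =====
def compute_same_padding_transposed_py_alt (kernel_size : Int) (dilation : Int) (stride : Int) : Int × Int :=
  let effective_kernel_size := dilation * (kernel_size - 1) + 1
  let kernel_residual := effective_kernel_size - stride
  let output_padding : Int :=
    if PySem.Int.mod (kernel_residual + stride - 1) 2 == 0 then stride - 1 else stride - 2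
  if output_padding < 0 then (0, 0)   -- Python raises ValueError here; excluded by Pre_
  else (PySem.Int.floordiv (kernel_residual + output_padding) 2, output_padding)

-- ===== PRECONDITION & SPEC =====
-- Pre_ excludes exactly the inputs where A raises ValueError: stride ≤ 0 (empty range),
-- or stride = 1 with odd kernel_residual (the single candidate fails the parity test).
def Pre_compute_same_padding_transposed_py (kernel_size : Int) (dilation : Int) (stride : Int) : Prop :=
  1 ≤ stride ∧ (2 ≤ stride ∨ (dilation * (kernel_size - 1) + 1 - stride) % 2 = 0)
instance (kernel_size : Int) (dilation : Int) (stride : Int) : Decidable (Pre_compute_same_padding_transposed_py kernel_size dilation stride) := by unfold Pre_compute_same_padding_transposed_py; infer_instance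

def pvWitness_compute_same_padding_transposed_py : Int × Int × Int := (3, 1, 2)

def Spec_compute_same_padding_transposed_py (kernel_size : Int) (dilation : Int) (stride : Int) (out : Int × Int) : Prop := out = compute_same_padding_transposed_py_alt kernel_size dilation stride
instance (kernel_size : Int) (dilation : Int) (stride : Int) (out : Int × Int) : Decidable (Spec_compute_same_padding_transposed_py kernel_size dilation stride out) := by unfold Spec_compute_same_padding_transposed_py; infer_instance

-- ===== CLAIM (what is proved, stated in full; the proofs are below) =====
def Claim_equal_compute_same_padding_transposed_py : Prop := ∀ (kernel_size : Int) (dilation : Int) (stride : Int), Dom_compute_same_padding_transposed_py kernel_size dilation stride → Pre_compute_same_padding_transposed_py kernel_size dilation stride → Spec_compute_same_padding_transposed_py kernel_size dilation stride (compute_same_padding_transposed_py kernel_size dilation stride)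

-- ===== LEMMAS AND PROOFS =====

-- ===== VERDICT (by name: the statement is the Claim_ definition above) =====
theorem compute_same_padding_transposed_py_spec : Claim_equal_compute_same_padding_transposed_py := by
  intro k d s _ hpre
  obtain ⟨hs1, hpar⟩ := hpre
  unfold Spec_compute_same_padding_transposed_py
  unfold compute_same_padding_transposed_py compute_same_padding_transposed_py_alt
  have hm : ∀ x : Int, PySem.Int.mod x 2 = x % 2 :=
    fun x => PySem.Int.mod_eq_emod_of_pos (by omega)
  by_cases h2 : 2 ≤ s
  · obtain ⟨m, hfuel⟩ : ∃ m, s.toNat = m + 2 := ⟨s.toNat - 2, by omega⟩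
    rw [hfuel]
    simp only [pvLoopA, hm]
    by_cases hd : (2 : Int) ∣ d * (k - 1)
    · -- first candidate stride-1 matches: kr + (s-1) = d*(k-1) is even
      simp [hd, show ¬ s - 1 < 0 by omega,
            show d * (k - 1) + 1 - s + (s - 1) = d * (k - 1) by ring]
    · -- stride-1 fails, stride-2 matches
      have hd2 : (2 : Int) ∣ d * (k - 1) + 1 := by omega
      simp [hd, hd2, show ¬ s - 2 < 0 by omega,
            show d * (k - 1) + 1 - s + (s - 2) = d * (k - 1) + 1 - 2 by ring,
            show s - 1 - 1 = s - 2 by ring]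
  · -- s = 1, and Pre_ gives even kernel_residual
    have hs : s = 1 := by omega
    subst hs
    have hpe : (d * (k - 1) + 1 - 1) % 2 = 0 := hpar.resolve_left (by omega)
    have hd : (2 : Int) ∣ d * (k - 1) := by omega
    simp only [show (1 : Int).toNat = 1 from rfl, pvLoopA, hm]
    simp [hd]
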